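-- pv_equiv track=rewrite | github.com/AnshuSharma111/KrishiAayog | ML Server/app.py | process_llm_output
-- ===== SOURCE A (Python) =====
-- def process_llm_output(message):
--     edited_msg = ''''''
--     for i in range(len(message)):
--         if i + 3 < len(message) and message[i:i+4] == '    ':
--             continue
--         if message[i] not in ['\n', '*', '\'']:
--             edited_msg += message[i]
--     desc, ca, cu = edited_msg.find("Description"), edited_msg.find("Causes"), edited_msg.find("Cure")
--     description = edited_msg[desc + 13 : ca - 3]
--     cause = edited_msg[ca + 8:cu - 3]
--     cure = edited_msg[cu + 8:]
--     return (description, cause, cure)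
-- ===== SOURCE B (Python) =====
-- def process_llm_output(message):
--     # Single pass with a run-length counter: runs of >=4 spaces collapse to 3,
--     # and '\n', '*', "'" are dropped; then the same section extraction as before.
--     cleaned = ''
--     run = 0
--     for ch in message:
--         if ch == ' ':
--             run += 1
--         else:
--             cleaned += ' ' * min(run, 3)
--             run = 0
--             if ch not in '\n*\'':
--                 cleaned += ch
--     cleaned += ' ' * min(run, 3)
--     desc, ca, cu = cleaned.find("Description"), cleaned.find("Causes"), cleaned.find("Cure")
--     description = cleaned[desc + 13 : ca - 3]
--     cause = cleaned[ca + 8 : cu - 3]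
--     cure = cleaned[cu + 8 :]
--     return (description, cause, cure)
-- ===== Notes on version B (the rewrite author's own statement) =====
-- stated objective: alternative
-- what changed: Replaced the indexed loop with 4-char lookahead slices at every position by a single forward pass that maintains a space-run counter and emits min(run,3) spaces at each run's end; section extraction unchanged.
import Mathlib
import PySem

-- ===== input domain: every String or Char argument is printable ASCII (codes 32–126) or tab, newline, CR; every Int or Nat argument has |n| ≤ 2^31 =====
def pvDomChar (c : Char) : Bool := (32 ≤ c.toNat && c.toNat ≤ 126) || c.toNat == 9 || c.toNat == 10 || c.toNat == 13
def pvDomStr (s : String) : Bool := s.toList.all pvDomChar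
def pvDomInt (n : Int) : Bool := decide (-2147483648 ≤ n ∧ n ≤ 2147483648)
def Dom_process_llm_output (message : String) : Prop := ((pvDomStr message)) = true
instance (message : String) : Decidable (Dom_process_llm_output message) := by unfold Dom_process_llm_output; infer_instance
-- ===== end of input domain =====

-- B replaces A's indexed loop (4-char lookahead slice at every position) by one pass with a
-- space-run counter emitting min(run,3) spaces per run; the section extraction is unchanged.

-- characters both Pythons drop: '\n', '*', '\''
def pvBad : List Char := ['\n', '*', '\'']

-- the section-extraction tail shared verbatim by both Pythons (find + the three slices)
def pvExtract (edited : List Char) : String × String × String :=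
  let desc := PySem.Chars.find edited "Description".toList
  let ca := PySem.Chars.find edited "Causes".toList
  let cu := PySem.Chars.find edited "Cure".toList
  (String.ofList (PySem.List.slice edited (some (desc + 13)) (some (ca - 3))),
   String.ofList (PySem.List.slice edited (some (ca + 8)) (some (cu - 3))),
   String.ofList (PySem.List.slice edited (some (cu + 8)) none))

-- ===== PORT A =====
def process_llm_output (message : String) : String × String × String :=
  let s := message.toList
  let edited := (PySem.List.pyRange 0 (s.length : Int) 1).foldl
    (fun acc i =>
      if i + 3 < (s.length : Int) ∧
          PySem.List.slice s (some i) (some (i + 4)) = [' ', ' ', ' ', ' '] then acc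
      else if PySem.List.pyGetD s i ' ' ∈ pvBad then acc
      else acc ++ [PySem.List.pyGetD s i ' ']) ([] : List Char)
  pvExtract edited

-- ===== PORT B =====
-- one step of B's loop: state = (cleaned so far, current space-run length)
def pvStep (st : List Char × Nat) (ch : Char) : List Char × Nat :=
  if ch = ' ' then (st.1, st.2 + 1)
  else (st.1 ++ List.replicate (min st.2 3) ' ' ++ (if ch ∈ pvBad then [] else [ch]), 0)

def process_llm_output_alt (message : String) : String × String × String :=
  let st := message.toList.foldl pvStep (([] : List Char), 0)
  let cleaned := st.1 ++ List.replicate (min st.2 3) ' '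
  pvExtract cleaned

-- ===== PRECONDITION & SPEC =====
def Spec_process_llm_output (message : String) (out : String × String × String) : Prop := out = process_llm_output_alt message
instance (message : String) (out : String × String × String) : Decidable (Spec_process_llm_output message out) := by unfold Spec_process_llm_output; infer_instance

-- ===== CLAIM (what is proved, stated in full; the proofs are below) =====
def Claim_equal_process_llm_output : Prop := ∀ (message : String), Dom_process_llm_output message → Spec_process_llm_output message (process_llm_output message)

-- ===== LEMMAS AND PROOFS =====

-- common specification of the cleaning pass: keep a char unless it starts 4 spaces or is unwanted
def specA : List Char → List Char
  | [] => []
  | c :: rest =>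
    if c = ' ' ∧ rest.take 3 = [' ', ' ', ' '] then specA rest
    else if c ∈ pvBad then specA rest
    else c :: specA rest

lemma specA_replicate (k : Nat) :
    specA (List.replicate k ' ') = List.replicate (min k 3) ' ' := by
  induction k with
  | zero => simp [specA]
  | succ n ih =>
    rw [List.replicate_succ, specA]
    by_cases h : 3 ≤ n
    · have ht : (List.replicate n ' ').take 3 = [' ', ' ', ' '] := by
        rw [List.take_replicate]
        have : min 3 n = 3 := by omega
        rw [this]; rfl
      rw [if_pos ⟨rfl, ht⟩, ih]
      have h1 : min n 3 = 3 := by omega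
      have h2 : min (n + 1) 3 = 3 := by omega
      rw [h1, h2]
    · have ht : (List.replicate n ' ').take 3 ≠ [' ', ' ', ' '] := by
        rw [List.take_replicate]
        intro hcontra
        have := congrArg List.length hcontra
        simp at this; omega
      rw [if_neg (by intro hh; exact ht hh.2), if_neg (by decide), ih]
      have h1 : min n 3 = n := by omega
      have h2 : min (n + 1) 3 = n + 1 := by omega
      rw [h1, h2, ← List.replicate_succ]

lemma specA_replicate_cons (run : Nat) (c : Char) (rest : List Char) (hc : c ≠ ' ') :
    specA (List.replicate run ' ' ++ c :: rest)
      = List.replicate (min run 3) ' ' ++ (if c ∈ pvBad then [] else [c]) ++ specA rest := by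
  induction run with
  | zero =>
    simp only [List.replicate, List.nil_append, specA]
    have : ¬ (c = ' ' ∧ (rest.take 3) = [' ', ' ', ' ']) := by
      intro h; exact hc h.1
    rw [if_neg this]
    split_ifs <;> simp
  | succ n ih =>
    rw [List.replicate_succ, List.cons_append, specA]
    by_cases h : 3 ≤ n
    · have ht : (List.replicate n ' ' ++ c :: rest).take 3 = [' ', ' ', ' '] := by
        rw [List.take_append_of_le_length (by simp; omega), List.take_replicate]
        have : min 3 n = 3 := by omega
        rw [this]; rfl
      rw [if_pos ⟨rfl, ht⟩, ih]
      have h1 : min n 3 = 3 := by omega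
      have h2 : min (n + 1) 3 = 3 := by omega
      rw [h1, h2]
    · have ht : (List.replicate n ' ' ++ c :: rest).take 3 ≠ [' ', ' ', ' '] := by
        interval_cases n
        · simp [hc]
        · simp [List.replicate, hc]
        · simp [List.replicate, hc]
      rw [if_neg (by intro hh; exact ht hh.2), if_neg (by decide), ih]
      have h1 : min n 3 = n := by omega
      have h2 : min (n + 1) 3 = n + 1 := by omega
      rw [h1, h2]
      simp [List.replicate_succ]

-- B's loop computes specA
lemma foldB (s : List Char) : ∀ (out : List Char) (run : Nat),
    (s.foldl pvStep (out, run)).1 ++ List.replicate (min (s.foldl pvStep (out, run)).2 3) ' '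
      = out ++ specA (List.replicate run ' ' ++ s) := by
  induction s with
  | nil =>
    intro out run
    simp only [List.foldl_nil, List.append_nil, specA_replicate]
  | cons c rest ih =>
    intro out run
    by_cases hc : c = ' '
    · subst hc
      have hstep : pvStep (out, run) ' ' = (out, run + 1) := by simp [pvStep]
      rw [List.foldl_cons, hstep, ih out (run + 1)]
      congr 2
      simp [List.replicate_succ', List.append_assoc]
    · have hstep : pvStep (out, run) c
          = (out ++ List.replicate (min run 3) ' ' ++ (if c ∈ pvBad then [] else [c]), 0) := by
        simp [pvStep, hc]
      rw [List.foldl_cons, hstep, ih _ 0]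
      simp only [List.replicate, List.nil_append]
      rw [specA_replicate_cons run c rest hc]
      simp [List.append_assoc]

-- A's indexed loop computes specA
lemma foldA (s : List Char) : ∀ (pre acc : List Char),
    (PySem.List.pyRange (pre.length : Int) (((pre.length + s.length : Nat) : Nat) : Int) 1).foldl
      (fun acc i =>
        if i + 3 < (((pre ++ s).length : Nat) : Int) ∧
            PySem.List.slice (pre ++ s) (some i) (some (i + 4)) = [' ', ' ', ' ', ' '] then acc
        else if PySem.List.pyGetD (pre ++ s) i ' ' ∈ pvBad then acc
        else acc ++ [PySem.List.pyGetD (pre ++ s) i ' ']) acc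
    = acc ++ specA s := by
  induction s with
  | nil =>
    intro pre acc
    simp [specA, PySem.List.pyRange]
  | cons c rest ih =>
    intro pre acc
    have hb : ((pre.length : Nat) : Int) < (((pre.length + (c :: rest).length : Nat) : Nat) : Int) := by
      push_cast; simp
    rw [PySem.List.pyRange_one_cons hb, List.foldl_cons]
    have h4 : ((pre.length : Int) + 4) = ((pre.length + 4 : Nat) : Int) := by push_cast; ring
    have hslice : PySem.List.slice (pre ++ c :: rest) (some (pre.length : Int))
        (some ((pre.length : Int) + 4)) = (c :: rest).take 4 := by
      rw [h4, PySem.List.slice_natCast]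
      simp
    have hget : PySem.List.pyGetD (pre ++ c :: rest) (pre.length : Int) ' ' = c := by
      rw [PySem.List.pyGetD_natCast]
      simp [List.getD_eq_getElem?_getD]
    rw [hslice, hget]
    have hIH := ih (pre ++ [c])
    simp only [List.length_append, List.length_cons, List.length_nil, List.append_assoc,
      List.singleton_append, Nat.zero_add] at hIH ⊢
    rw [show ((pre.length + 1 : Nat) : Int) = (pre.length : Int) + 1 from by push_cast; ring,
        show pre.length + 1 + rest.length = pre.length + (rest.length + 1) from by omega] at hIH
    by_cases hC : c = ' ' ∧ rest.take 3 = [' ', ' ', ' ']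
    · have hlen3 : 3 ≤ rest.length := by
        have := congrArg List.length hC.2
        simp at this; omega
      rw [if_pos ⟨by push_cast; omega, by simp [hC.1, hC.2]⟩]
      rw [specA, if_pos hC, hIH acc]
    · have hcond : ¬ ((pre.length : Int) + 3 < ((pre.length + (rest.length + 1) : Nat) : Int) ∧
          (c :: rest).take 4 = [' ', ' ', ' ', ' ']) := by
        rintro ⟨-, h2⟩
        exact hC (by simpa using h2)
      rw [if_neg hcond, specA, if_neg hC]
      by_cases hcb : c ∈ pvBad
      · rw [if_pos hcb, if_pos hcb, hIH acc]
      · rw [if_neg hcb, if_neg hcb, hIH (acc ++ [c])]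
        simp

theorem process_llm_output_spec : Claim_equal_process_llm_output := by
  intro message _
  unfold Spec_process_llm_output process_llm_output process_llm_output_alt
  have hA := foldA message.toList [] []
  simp only [List.nil_append, List.length_nil, Nat.zero_add, Nat.cast_zero] at hA
  have hB := foldB message.toList [] 0
  simp only [List.replicate, List.nil_append] at hB
  simp only [hA, hB]
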